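-- pv_equiv track=rewrite | github.com/wwwxxxVoila/crypto_xdu | 实验一/2/1-2.py | candidate_keys_for_column
-- ===== SOURCE A (Python) =====
-- def candidate_keys_for_column(byte_group, allowed_chars):
--     candidates = set()
--     for k in range(256):
--         ok = True
--         for b in byte_group:
--             if (b ^ k) not in allowed_chars:
--                 ok = False
--                 break
--         if ok:
--             candidates.add(k)
--     return candidates
-- ===== SOURCE B (Python) =====
-- def candidate_keys_for_column(byte_group, allowed_chars):
--     candidates = set(range(256))
--     for b in byte_group:
--         candidates &= {b ^ c for c in allowed_chars}
--         if not candidates: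
--             break
--     return candidates
-- ===== Notes on version B (the rewrite author's own statement) =====
-- stated objective: alternative
-- what changed: Instead of trying all 256 keys and testing every byte against allowed_chars, B derives the admissible key set {b ^ c : c in allowed_chars} for each byte and intersects these sets (seeded with range(256)) across the bytes.
import Mathlib
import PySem

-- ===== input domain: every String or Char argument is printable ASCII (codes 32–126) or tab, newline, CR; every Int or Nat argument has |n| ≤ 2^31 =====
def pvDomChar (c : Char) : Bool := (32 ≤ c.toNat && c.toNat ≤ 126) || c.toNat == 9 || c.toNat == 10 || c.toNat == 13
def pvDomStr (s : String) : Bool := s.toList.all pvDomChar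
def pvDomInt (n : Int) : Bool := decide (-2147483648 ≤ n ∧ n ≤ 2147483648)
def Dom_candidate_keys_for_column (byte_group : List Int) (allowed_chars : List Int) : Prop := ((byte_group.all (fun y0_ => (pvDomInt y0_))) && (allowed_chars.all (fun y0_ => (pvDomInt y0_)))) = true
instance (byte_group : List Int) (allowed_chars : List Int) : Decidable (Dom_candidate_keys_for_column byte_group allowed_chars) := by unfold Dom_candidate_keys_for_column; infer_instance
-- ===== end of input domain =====

-- B replaces A's 256-key trial loop by deriving the admissible key set from allowed_chars for
-- each byte and intersecting across bytes (objective: alternative algorithm; not claimed faster).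

-- ===== PORT A =====
-- inner 'for b in byte_group: if (b ^ k) not in allowed_chars: ok = False; break'
def ckfcOk (byte_group : List Int) (allowed_chars : List Int) (k : Int) : Bool :=
  match byte_group with
  | [] => true
  | b :: rest =>
      if ¬ (PySem.Set.contains allowed_chars (PySem.Int.bxor b k)) then false
      else ckfcOk rest allowed_chars k

def candidate_keys_for_column (byte_group : List Int) (allowed_chars : List Int) : List Int :=
  (PySem.List.pyRange 0 256 1).foldl
    (fun candidates k =>
      if ckfcOk byte_group allowed_chars k then PySem.Set.add candidates k else candidates)
    PySem.Set.empty

-- ===== PORT B =====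
-- 'for b in byte_group: candidates &= {b ^ c for c in allowed_chars}; if not candidates: break'
def altLoop (bs : List Int) (al : List Int) (cand : List Int) : List Int :=
  match bs with
  | [] => cand
  | b :: rest =>
      let cand' := PySem.Set.inter cand
        (PySem.Set.ofList (al.map (fun c => PySem.Int.bxor b c)))
      if cand' = [] then cand' else altLoop rest al cand'

def candidate_keys_for_column_alt (byte_group : List Int) (allowed_chars : List Int) : List Int :=
  altLoop byte_group allowed_chars (PySem.Set.ofList (PySem.List.pyRange 0 256 1))

-- ===== PRECONDITION & SPEC =====
def Spec_candidate_keys_for_column (byte_group : List Int) (allowed_chars : List Int) (out : List Int) : Prop := out = candidate_keys_for_column_alt byte_group allowed_chars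
instance (byte_group : List Int) (allowed_chars : List Int) (out : List Int) : Decidable (Spec_candidate_keys_for_column byte_group allowed_chars out) := by unfold Spec_candidate_keys_for_column; infer_instance

-- ===== CLAIM (what is proved, stated in full; the proofs are below) =====
def Claim_equal_candidate_keys_for_column : Prop := ∀ (byte_group : List Int) (allowed_chars : List Int), Dom_candidate_keys_for_column byte_group allowed_chars → Spec_candidate_keys_for_column byte_group allowed_chars (candidate_keys_for_column byte_group allowed_chars)

-- ===== LEMMAS AND PROOFS =====

lemma bxor_invol (a b : Int) : PySem.Int.bxor a (PySem.Int.bxor a b) = b := by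
  have hnat : ∀ x y : Nat, x ^^^ (x ^^^ y) = y := fun x y => by
    rw [← Nat.xor_assoc, Nat.xor_self, Nat.zero_xor]
  unfold PySem.Int.bxor
  by_cases ha : 0 ≤ a <;> by_cases hb : 0 ≤ b <;>
    simp only [ha, hb, if_false, if_pos] <;>
    split_ifs <;>
    simp_all [Int.toNat_natCast] <;> omega

lemma contains_eq_decide (s : List Int) (x : Int) :
    PySem.Set.contains s x = decide (x ∈ s) := by
  simp [PySem.Set.contains]

-- the per-byte key set of B tests exactly A's membership condition
lemma contains_map_bxor (al : List Int) (b k : Int) :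
    PySem.Set.contains (PySem.Set.ofList (al.map (fun c => PySem.Int.bxor b c))) k
      = PySem.Set.contains al (PySem.Int.bxor b k) := by
  rw [contains_eq_decide, contains_eq_decide]
  apply decide_eq_decide.mpr
  rw [PySem.Set.mem_ofList, List.mem_map]
  constructor
  · rintro ⟨c, hc, rfl⟩; rwa [bxor_invol]
  · intro h; exact ⟨PySem.Int.bxor b k, h, bxor_invol b k⟩

lemma ckfcOk_eq_all (bg al : List Int) (k : Int) :
    ckfcOk bg al k = bg.all (fun b => PySem.Set.contains al (PySem.Int.bxor b k)) := by
  induction bg with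
  | nil => rfl
  | cons b rest ih =>
      by_cases h : PySem.Set.contains al (PySem.Int.bxor b k) = true <;>
        simp [ckfcOk, ih]

lemma set_add_of_not_mem (s : List Int) (x : Int) (h : x ∉ s) :
    PySem.Set.add s x = s ++ [x] := by
  simp [PySem.Set.add, PySem.Set.contains, h]

-- A's accumulation loop over a duplicate-free range is a filter
lemma foldl_add_eq_filter (p : Int → Bool) (l acc : List Int)
    (hn : l.Nodup) (hd : ∀ x ∈ l, x ∉ acc) :
    l.foldl (fun cs k => if p k then PySem.Set.add cs k else cs) acc = acc ++ l.filter p := by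
  induction l generalizing acc with
  | nil => simp
  | cons a l ih =>
      have hna : a ∉ acc := hd a (by simp)
      rcases List.nodup_cons.mp hn with ⟨hal, hln⟩
      by_cases hp : p a = true
      · rw [List.foldl_cons]
        simp only [hp, if_pos]
        rw [set_add_of_not_mem acc a hna,
          ih _ hln (fun x hx => by
            intro hmem
            rcases List.mem_append.mp hmem with h1 | h1
            · exact hd x (by simp [hx]) h1
            · simp at h1; exact hal (h1 ▸ hx))]
        simp [hp]
      · rw [List.foldl_cons]
        simp only [hp, if_neg, Bool.false_eq_true, not_false_iff]
        rw [ih _ hln (fun x hx => hd x (by simp [hx]))]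
        simp [hp]

-- B's intersection loop (with its empty-set early exit) is a filter by the conjunction
-- of the per-byte tests
lemma altLoop_eq_filter (al bs s : List Int) :
    altLoop bs al s = s.filter (fun k => bs.all (fun b =>
      PySem.Set.contains (PySem.Set.ofList (al.map (fun c => PySem.Int.bxor b c))) k)) := by
  induction bs generalizing s with
  | nil => simp [altLoop]
  | cons b rest ih =>
      have hstep : s.filter (fun k => (b :: rest).all (fun b' =>
            PySem.Set.contains (PySem.Set.ofList (al.map (fun c => PySem.Int.bxor b' c))) k))
          = (PySem.Set.inter s
              (PySem.Set.ofList (al.map (fun c => PySem.Int.bxor b c)))).filter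
              (fun k => rest.all (fun b' =>
                PySem.Set.contains (PySem.Set.ofList (al.map (fun c => PySem.Int.bxor b' c))) k)) := by
        show _ = (s.filter _).filter _
        rw [List.filter_filter]
        apply List.filter_congr
        intro k _
        simp [Bool.and_comm]
      unfold altLoop
      by_cases h : PySem.Set.inter s
          (PySem.Set.ofList (al.map (fun c => PySem.Int.bxor b c))) = []
      · simp only [h, if_pos]
        rw [hstep, h]
        simp
      · rw [if_neg h, ih]
        exact hstep.symm

-- ===== VERDICT (by name: the statement is the Claim_ definition above) =====
theorem candidate_keys_for_column_spec : Claim_equal_candidate_keys_for_column := by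
  intro bg al _
  unfold Spec_candidate_keys_for_column candidate_keys_for_column candidate_keys_for_column_alt
  rw [PySem.Set.ofList_eq_self_of_nodup _ (PySem.List.nodup_pyRange_one 0 256),
    altLoop_eq_filter,
    foldl_add_eq_filter _ _ _ (PySem.List.nodup_pyRange_one 0 256) (by simp [PySem.Set.empty])]
  rw [show (PySem.Set.empty : List Int) = [] from rfl, List.nil_append]
  apply List.filter_congr
  intro k _
  rw [ckfcOk_eq_all]
  simp only [contains_map_bxor]
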